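-- pv_equiv track=rewrite | github.com/AmeliaKh/Connect-4 | Engine_minus_graphics.py | score_list2
-- ===== SOURCE A (Python) =====
-- def score_list2(list):
--     #JUST CHECKS FOR  - 4 - IN A ROW
--     white_ = 0
--     brown_ = 0
--     for start_index in range(len(list)-4+1):
--         token = list[start_index+1]
--         if token!= 0:
--             items = [list[start_index],list[start_index+1], list[start_index+2],list[start_index+3]]
--             if all(x == token for x in items):
--                 if token == 1:
--                     white_+= 1
--                 else: brown_ +=1
--
--     return (white_,brown_)
-- ===== SOURCE B (Python) =====
-- def _flush(white_, brown_, cur, run):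
--     # credit a finished run: a run of length L >= 4 of a nonzero value
--     # contains L-3 four-in-a-row windows
--     if cur != 0 and run > 3:
--         if cur == 1:
--             white_ += run - 3
--         else:
--             brown_ += run - 3
--     return (white_, brown_)
--
-- def score_list2(list):
--     # single pass over maximal runs of equal values instead of testing every 4-window
--     white_ = 0
--     brown_ = 0
--     cur = 0
--     run = 0
--     for x in list:
--         if x == cur:
--             run += 1
--         else:
--             white_, brown_ = _flush(white_, brown_, cur, run)
--             cur = x
--             run = 1
--     white_, brown_ = _flush(white_, brown_, cur, run)
--     return (white_, brown_)
-- ===== Notes on version B (the rewrite author's own statement) =====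
-- stated objective: faster
-- what changed: B replaces the scan of every 4-element window (4 indexed reads and an all() per window) with a single run-length pass: each maximal run of length L of a nonzero value contributes max(0, L-3) windows, flushed when the value changes and at the end.
import Mathlib
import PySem

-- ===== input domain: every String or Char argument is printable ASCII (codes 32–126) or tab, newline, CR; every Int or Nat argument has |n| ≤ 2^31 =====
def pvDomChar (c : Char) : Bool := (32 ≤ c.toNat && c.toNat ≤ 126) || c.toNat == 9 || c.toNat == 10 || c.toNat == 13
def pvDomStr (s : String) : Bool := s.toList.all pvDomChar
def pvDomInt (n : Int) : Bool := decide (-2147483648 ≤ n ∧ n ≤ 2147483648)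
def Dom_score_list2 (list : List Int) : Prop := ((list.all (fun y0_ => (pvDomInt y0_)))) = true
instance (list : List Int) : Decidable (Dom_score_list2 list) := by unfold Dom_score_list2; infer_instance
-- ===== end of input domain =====

-- B changes the algorithm: one run-length pass crediting max(0, L-3) per maximal nonzero run,
-- instead of A's test of every 4-element window; proved to return the same pair on all inputs.

-- ===== PORT A =====
def score_list2 (list : List Int) : Int × Int :=
  (PySem.List.pyRange 0 ((list.length : Int) - 4 + 1) 1).foldl
    (fun (wb : Int × Int) start_index =>
      let token := PySem.List.pyGetD list (start_index + 1) 0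
      if token ≠ 0 then
        let items := [PySem.List.pyGetD list start_index 0, PySem.List.pyGetD list (start_index + 1) 0,
                      PySem.List.pyGetD list (start_index + 2) 0, PySem.List.pyGetD list (start_index + 3) 0]
        if items.all (fun x => x == token) then
          if token == 1 then (wb.1 + 1, wb.2) else (wb.1, wb.2 + 1)
        else wb
      else wb)
    (0, 0)

-- ===== PORT B =====
-- helper `_flush` of Source B
def pvFlush (white_ brown_ cur run : Int) : Int × Int :=
  if cur ≠ 0 ∧ run > 3 then
    (if cur = 1 then (white_ + (run - 3), brown_) else (white_, brown_ + (run - 3)))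
  else (white_, brown_)

def score_list2_alt (list : List Int) : Int × Int :=
  let s := list.foldl
    (fun (s : Int × Int × Int × Int) x =>
      let (white_, brown_, cur, run) := s
      if x = cur then (white_, brown_, cur, run + 1)
      else
        let (w', b') := pvFlush white_ brown_ cur run
        (w', b', x, 1))
    (0, 0, 0, 0)
  pvFlush s.1 s.2.1 s.2.2.1 s.2.2.2

-- ===== PRECONDITION & SPEC =====
def Spec_score_list2 (list : List Int) (out : Int × Int) : Prop := out = score_list2_alt list
instance (list : List Int) (out : Int × Int) : Decidable (Spec_score_list2 list out) := by unfold Spec_score_list2; infer_instance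

-- ===== CLAIM (what is proved, stated in full; the proofs are below) =====
def Claim_equal_score_list2 : Prop := ∀ (list : List Int), Dom_score_list2 list → Spec_score_list2 list (score_list2 list)

-- ===== LEMMAS AND PROOFS =====

-- (white, brown) increment for one 4-window whose value is c
def bumpN (c k : Int) : Int × Int := if c = 1 then (k, 0) else (0, k)

-- common spec: window count as a structural recursion peeling one element at a time
def wc : List Int → Int × Int
  | [] => (0, 0)
  | a :: l =>
    (if 3 ≤ l.length ∧ l.getD 0 0 = a ∧ l.getD 1 0 = a ∧ l.getD 2 0 = a ∧ a ≠ 0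
     then bumpN a 1 else (0, 0)) + wc l

-- A's per-window contribution, with Nat indexing
def gN (l : List Int) (k : Nat) : Int × Int :=
  let t := l.getD (k + 1) 0
  if t ≠ 0 ∧ l.getD k 0 = t ∧ l.getD (k + 1) 0 = t ∧ l.getD (k + 2) 0 = t ∧ l.getD (k + 3) 0 = t
  then bumpN t 1 else (0, 0)

def WA (l : List Int) : Int × Int := ((List.range (l.length - 3)).map (gN l)).sum

lemma foldl_add_pair {α : Type} (l : List α) (g : α → Int × Int) (a : Int × Int) :
    l.foldl (fun s e => s + g e) a = a + (l.map g).sum := by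
  induction l generalizing a with
  | nil => simp
  | cons x t ih => simp [List.foldl_cons, ih, add_assoc]

lemma score_list2_eq_WA (l : List Int) : score_list2 l = WA l := by
  unfold score_list2 WA
  have hbody : (fun (wb : Int × Int) (start_index : Int) =>
      let token := PySem.List.pyGetD l (start_index + 1) 0
      if token ≠ 0 then
        let items := [PySem.List.pyGetD l start_index 0, PySem.List.pyGetD l (start_index + 1) 0,
                      PySem.List.pyGetD l (start_index + 2) 0, PySem.List.pyGetD l (start_index + 3) 0]
        if items.all (fun x => x == token) then
          if token == 1 then (wb.1 + 1, wb.2) else (wb.1, wb.2 + 1)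
        else wb
      else wb)
      = (fun wb i =>
          wb + (let t := PySem.List.pyGetD l (i + 1) 0
                if t ≠ 0 ∧ PySem.List.pyGetD l i 0 = t ∧ PySem.List.pyGetD l (i + 1) 0 = t ∧
                    PySem.List.pyGetD l (i + 2) 0 = t ∧ PySem.List.pyGetD l (i + 3) 0 = t
                then bumpN t 1 else (0, 0))) := by
    funext wb i
    simp only [List.all_cons, List.all_nil, Bool.and_true, beq_iff_eq, bumpN]
    split_ifs <;> simp_all [Prod.ext_iff]
  rw [hbody, foldl_add_pair, PySem.List.pyRange_one, List.map_map]
  have hlen : (((l.length : Int) - 4 + 1) - 0).toNat = l.length - 3 := by omega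
  rw [hlen]
  have hmap : (List.range (l.length - 3)).map
      ((fun i => (let t := PySem.List.pyGetD l (i + 1) 0
                  if t ≠ 0 ∧ PySem.List.pyGetD l i 0 = t ∧ PySem.List.pyGetD l (i + 1) 0 = t ∧
                      PySem.List.pyGetD l (i + 2) 0 = t ∧ PySem.List.pyGetD l (i + 3) 0 = t
                  then bumpN t 1 else (0, 0))) ∘ (fun k : Nat => (0 : Int) + (k : Int)))
      = (List.range (l.length - 3)).map (gN l) := by
    apply List.map_congr_left
    intro k _
    have e : ∀ (i : Nat), PySem.List.pyGetD l ((i : Int)) 0 = l.getD i 0 := fun i =>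
      PySem.List.pyGetD_natCast l i 0
    simp only [Function.comp, gN, zero_add]
    have h1 : (k : Int) + 1 = ((k + 1 : Nat) : Int) := by push_cast; ring
    have h2 : (k : Int) + 2 = ((k + 2 : Nat) : Int) := by push_cast; ring
    have h3 : (k : Int) + 3 = ((k + 3 : Nat) : Int) := by push_cast; ring
    rw [h1, h2, h3, e k, e (k + 1), e (k + 2), e (k + 3)]
  rw [hmap]
  have hz : ((0, 0) : Int × Int) = 0 := rfl
  rw [hz, zero_add]

lemma WA_eq_wc (l : List Int) : WA l = wc l := by
  induction l with
  | nil => simp [WA, wc]; rfl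
  | cons a l ih =>
    by_cases h3 : 3 ≤ l.length
    · have hr : (a :: l).length - 3 = (l.length - 3) + 1 := by simp; omega
      unfold WA
      rw [hr, List.range_succ_eq_map, List.map_cons, List.map_map, List.sum_cons]
      have hshift : (List.range (l.length - 3)).map (gN (a :: l) ∘ Nat.succ)
          = (List.range (l.length - 3)).map (gN l) := by
        apply List.map_congr_left
        intro k _
        simp [Function.comp, gN, Nat.succ_eq_add_one]
      have hhead : gN (a :: l) 0 =
          (if 3 ≤ l.length ∧ l.getD 0 0 = a ∧ l.getD 1 0 = a ∧ l.getD 2 0 = a ∧ a ≠ 0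
           then bumpN a 1 else (0, 0)) := by
        simp only [gN, List.getD_cons_succ, List.getD_cons_zero]
        split_ifs <;> simp_all
      rw [hshift, hhead]
      show _ = wc (a :: l)
      unfold wc
      rw [← ih]
      rfl
    · have hz : (a :: l).length - 3 = 0 := by simp; omega
      have hz' : l.length - 3 = 0 := by omega
      unfold WA at ih ⊢
      rw [hz]
      unfold wc
      rw [← ih, hz']
      simp [h3]
      rfl

-- run-length payout of a full run of length m of value c
def payN (c : Int) (m : Nat) : Int × Int :=
  if c ≠ 0 ∧ 4 ≤ m then bumpN c ((m : Int) - 3) else (0, 0)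

lemma getD_rep_append {m k : Nat} (c : Int) (zs : List Int) (h : k < m) :
    (List.replicate m c ++ zs).getD k 0 = c := by
  rw [List.getD_append _ _ _ _ (by simpa using h)]
  simp [List.getD, h]

lemma bumpN_add (c x y : Int) : bumpN c x + bumpN c y = bumpN c (x + y) := by
  unfold bumpN; split_ifs <;> simp [Prod.ext_iff] <;> ring

lemma wc_rep_cons (m : Nat) (c : Int) (zs : List Int)
    (hz : zs = [] ∨ ∃ y ys, zs = y :: ys ∧ y ≠ c) :
    wc (List.replicate m c ++ zs) = payN c m + wc zs := by
  induction m with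
  | zero => simp [payN]
  | succ m ih =>
    rw [List.replicate_succ, List.cons_append]
    show (if _ then bumpN c 1 else (0,0)) + wc (List.replicate m c ++ zs) = _
    rw [ih]
    have hcond : (3 ≤ (List.replicate m c ++ zs).length ∧
        (List.replicate m c ++ zs).getD 0 0 = c ∧ (List.replicate m c ++ zs).getD 1 0 = c ∧
        (List.replicate m c ++ zs).getD 2 0 = c ∧ c ≠ 0) ↔ (3 ≤ m ∧ c ≠ 0) := by
      constructor
      · rintro ⟨hl, h0, h1, h2, hc⟩
        refine ⟨?_, hc⟩
        by_contra hm
        push_neg at hm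
        rcases hz with rfl | ⟨y, ys, rfl, hy⟩
        · simp at hl; omega
        · interval_cases m <;> simp_all
      · rintro ⟨hm, hc⟩
        refine ⟨by simp; omega, ?_, ?_, ?_, hc⟩ <;>
          exact getD_rep_append c zs (by omega)
    rw [← add_assoc]
    congr 1
    simp only [hcond, payN]
    split_ifs with h1 h2 h3 h4 <;> try (exfalso; omega)
    · rw [bumpN_add]
      congr 1
      push_cast
      ring
    · have : m = 3 := by omega
      subst this
      norm_num [bumpN]
    · simp

lemma wc_short (zs : List Int) (h : zs.length < 4) : wc zs = (0, 0) := by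
  cases zs with
  | nil => rfl
  | cons a t =>
    cases t with
    | nil => simp [wc]
    | cons b t =>
      cases t with
      | nil => simp [wc]
      | cons c t =>
        cases t with
        | nil => simp [wc]
        | cons d t => simp at h; omega

-- invariant of B's fold: pending run of `run` copies of `cur`
def pvStep (s : Int × Int × Int × Int) (x : Int) : Int × Int × Int × Int :=
  let (white_, brown_, cur, run) := s
  if x = cur then (white_, brown_, cur, run + 1)
  else
    let (w', b') := pvFlush white_ brown_ cur run
    (w', b', x, 1)

lemma pvFlush_eq_pay (w b cur run : Int) (hrun : 1 ≤ run) :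
    pvFlush w b cur run = (w, b) + payN cur run.toNat := by
  unfold pvFlush payN
  have : ((run.toNat : Int)) = run := by omega
  split_ifs with h1 h2 h3 h4 <;> simp_all [Prod.ext_iff, bumpN] <;> omega

lemma go_inv (xs : List Int) : ∀ (w b cur run : Int), 1 ≤ run →
    (let s := xs.foldl pvStep (w, b, cur, run);
      pvFlush s.1 s.2.1 s.2.2.1 s.2.2.2)
    = (w, b) + wc (List.replicate run.toNat cur ++ xs) := by
  induction xs with
  | nil =>
    intro w b cur run hrun
    have h := wc_rep_cons run.toNat cur [] (Or.inl rfl)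
    rw [List.append_nil] at h
    simp only [List.foldl_nil, List.append_nil]
    rw [h, wc_short [] (by simp), pvFlush_eq_pay w b cur run hrun]
    simp
  | cons y ys ih =>
    intro w b cur run hrun
    simp only [List.foldl_cons]
    by_cases hy : y = cur
    · have hstep : pvStep (w, b, cur, run) y = (w, b, cur, run + 1) := by
        simp [pvStep, hy]
      rw [hstep, ih w b cur (run + 1) (by omega)]
      congr 2
      have : (run + 1).toNat = run.toNat + 1 := by omega
      rw [this, List.replicate_succ', hy, List.append_assoc]
      rfl
    · have hstep : pvStep (w, b, cur, run) y
          = ((pvFlush w b cur run).1, (pvFlush w b cur run).2, y, 1) := by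
        simp [pvStep, hy]
      rw [hstep, ih (pvFlush w b cur run).1 (pvFlush w b cur run).2 y 1 (by omega)]
      rw [wc_rep_cons run.toNat cur (y :: ys) (Or.inr ⟨y, ys, rfl, hy⟩)]
      have h1 : List.replicate (1 : Int).toNat y ++ ys = y :: ys := rfl
      rw [h1, pvFlush_eq_pay w b cur run hrun, add_assoc]

lemma alt_eq_wc (l : List Int) : score_list2_alt l = wc l := by
  have hdef : score_list2_alt l
      = (let s := l.foldl pvStep (0, 0, 0, 0); pvFlush s.1 s.2.1 s.2.2.1 s.2.2.2) := rfl
  rw [hdef]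
  cases l with
  | nil => rfl
  | cons x xs =>
    simp only [List.foldl_cons]
    have hstep : pvStep (0, 0, 0, 0) x = (0, 0, x, 1) := by
      by_cases hx : x = (0 : Int)
      · simp [pvStep, hx]
      · simp [pvStep, hx, pvFlush]
    rw [hstep, go_inv xs 0 0 x 1 (by omega)]
    have h1 : List.replicate (1 : Int).toNat x ++ xs = x :: xs := rfl
    rw [h1]
    simp

-- ===== VERDICT (by name: the statement is the Claim_ definition above) =====
theorem score_list2_spec : Claim_equal_score_list2 := by
  intro l _
  unfold Spec_score_list2
  rw [score_list2_eq_WA, WA_eq_wc, alt_eq_wc]
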